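-- pv_equiv track=rewrite | github.com/SadriddinDev/BinarySearch | Problems/Easy/672.py | solve
-- ===== SOURCE A (Python) =====
-- def solve(matrix):
--     for i in range(len(matrix)):
--         for j in range(len(matrix[i])):
--             matrix[i][j] = 0 if matrix[i][j] else 1
--
--     for i in range(len(matrix)):
--         n = len(matrix[i])
--         for j in range(n//2):
--             matrix[i][j], matrix[i][-(j+1)] = matrix[i][-(j+1)], matrix[i][j]
--     return matrix
-- ===== SOURCE B (Python) =====
-- def solve(matrix):
--     # Single fused in-place pass per row: invert + reverse together.
--     # Mutates the given matrix (same as the original) and returns it.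
--     for row in matrix:
--         n = len(row)
--         for j in range((n + 1) // 2):
--             row[j], row[-(j + 1)] = (0 if row[-(j + 1)] else 1), (0 if row[j] else 1)
--     return matrix
-- ===== Notes on version B (the rewrite author's own statement) =====
-- stated objective: alternative
-- what changed: A makes two full sweeps over every row (invert every entry, then reverse by swapping halves); B does a single fused half-length pass per row that inverts and swaps both ends in one step, handling the middle element of odd rows via range((n+1)//2).
import Mathlib
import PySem

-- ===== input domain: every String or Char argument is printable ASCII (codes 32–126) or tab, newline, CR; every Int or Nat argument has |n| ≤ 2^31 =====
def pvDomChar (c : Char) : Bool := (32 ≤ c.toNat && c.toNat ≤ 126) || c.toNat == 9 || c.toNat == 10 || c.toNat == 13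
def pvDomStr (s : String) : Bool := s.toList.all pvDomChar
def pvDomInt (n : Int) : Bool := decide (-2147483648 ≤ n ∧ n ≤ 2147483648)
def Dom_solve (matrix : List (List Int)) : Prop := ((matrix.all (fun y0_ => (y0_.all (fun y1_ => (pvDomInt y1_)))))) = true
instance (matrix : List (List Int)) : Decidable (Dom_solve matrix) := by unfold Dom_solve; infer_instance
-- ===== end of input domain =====

-- B fuses A's two full in-place sweeps (invert every entry, then reverse every row) into one
-- half-length swap pass per row (objective: alternative decomposition). Both Pythons mutate the
-- argument's inner lists in place alike; the equivalence proved here is about the return value.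

-- ===== PORT A =====
-- first loop: matrix[i][j] = 0 if matrix[i][j] else 1 for each j in order
-- (the outer i-loop touches each row independently, i.e. a pass over the rows)
def pvInvertRow (row : List Int) : List Int :=
  (List.range row.length).foldl (fun a j => a.set j (if a.getD j 0 ≠ 0 then 0 else 1)) row

-- second loop: swap matrix[i][j] with matrix[i][-(j+1)] for j < n//2; the negative index
-- -(j+1) on a row of length n denotes position n-1-j (exact here: 1 ≤ j+1 ≤ n)
def pvSwapRow (row : List Int) : List Int :=
  (List.range (row.length / 2)).foldl
    (fun a j =>
      (a.set j (a.getD (row.length - 1 - j) 0)).set (row.length - 1 - j) (a.getD j 0)) row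

def solve (matrix : List (List Int)) : List (List Int) :=
  (matrix.map pvInvertRow).map pvSwapRow

-- ===== PORT B =====
-- one fused pass per row: row[j], row[-(j+1)] = (0 if row[-(j+1)] else 1), (0 if row[j] else 1)
-- for j < (n+1)//2; the tuple RHS is evaluated before either store, then stores go left to right
def pvFusedRow (row : List Int) : List Int :=
  (List.range ((row.length + 1) / 2)).foldl
    (fun a j =>
      let x : Int := if a.getD (row.length - 1 - j) 0 ≠ 0 then 0 else 1
      let y : Int := if a.getD j 0 ≠ 0 then 0 else 1
      (a.set j x).set (row.length - 1 - j) y) row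

def solve_alt (matrix : List (List Int)) : List (List Int) :=
  matrix.map pvFusedRow

-- ===== PRECONDITION & SPEC =====
def Spec_solve (matrix : List (List Int)) (out : List (List Int)) : Prop := out = solve_alt matrix
instance (matrix : List (List Int)) (out : List (List Int)) : Decidable (Spec_solve matrix out) := by unfold Spec_solve; infer_instance

-- ===== CLAIM (what is proved, stated in full; the proofs are below) =====
def Claim_equal_solve : Prop := ∀ (matrix : List (List Int)), Dom_solve matrix → Spec_solve matrix (solve matrix)

-- ===== LEMMAS AND PROOFS =====
def pvInv (z : Int) : Int := if z ≠ 0 then 0 else 1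

theorem getD_set (l : List Int) (i k : Nat) (x : Int) (hi : i < l.length) :
    (l.set i x).getD k 0 = if i = k then x else l.getD k 0 := by
  simp [List.getD_eq_getElem?_getD, List.getElem?_set]
  split_ifs <;> simp_all

theorem invert_loop (row : List Int) (m : Nat) (hm : m ≤ row.length) :
    ((List.range m).foldl (fun a j => a.set j (if a.getD j 0 ≠ 0 then 0 else 1)) row).length
        = row.length ∧
    ∀ k, k < row.length →
      ((List.range m).foldl (fun a j => a.set j (if a.getD j 0 ≠ 0 then 0 else 1)) row).getD k 0
        = if k < m then pvInv (row.getD k 0) else row.getD k 0 := by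
  induction m with
  | zero => simp
  | succ m ih =>
    obtain ⟨hlen, hval⟩ := ih (by omega)
    rw [List.range_succ, List.foldl_append, List.foldl_cons, List.foldl_nil]
    constructor
    · simp only [List.length_set]; exact hlen
    · intro k hk
      rw [getD_set _ _ _ _ (by omega)]
      rw [hval m (by omega), hval k hk]
      by_cases h : m = k <;> split_ifs <;> simp_all [pvInv] <;> omega

theorem swap_loop (row : List Int) (m : Nat) (hm : m ≤ row.length / 2) :
    ((List.range m).foldl
        (fun a j =>
          (a.set j (a.getD (row.length - 1 - j) 0)).set (row.length - 1 - j) (a.getD j 0))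
        row).length = row.length ∧
    ∀ k, k < row.length →
      ((List.range m).foldl
        (fun a j =>
          (a.set j (a.getD (row.length - 1 - j) 0)).set (row.length - 1 - j) (a.getD j 0))
        row).getD k 0
        = if k < m ∨ row.length - m ≤ k then row.getD (row.length - 1 - k) 0
          else row.getD k 0 := by
  induction m with
  | zero => simp; omega
  | succ m ih =>
    obtain ⟨hlen, hval⟩ := ih (by omega)
    have h2m : 2 * m + 1 < row.length := by omega
    rw [List.range_succ, List.foldl_append, List.foldl_cons, List.foldl_nil]
    constructor
    · simp only [List.length_set]; exact hlen
    · intro k hk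
      rw [getD_set _ _ _ _ (by simp only [List.length_set]; omega),
          getD_set _ _ _ _ (by omega)]
      rw [hval m (by omega), hval (row.length - 1 - m) (by omega), hval k hk]
      have e1 : row.length - 1 - (row.length - 1 - m) = m := by omega
      rw [e1]
      split_ifs <;> first | rfl | omega | (congr 1; omega)

theorem fused_loop (row : List Int) (m : Nat) (hm : m ≤ (row.length + 1) / 2) :
    ((List.range m).foldl
        (fun a j =>
          (a.set j (if a.getD (row.length - 1 - j) 0 ≠ 0 then 0 else 1)).set
            (row.length - 1 - j) (if a.getD j 0 ≠ 0 then 0 else 1))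
        row).length = row.length ∧
    ∀ k, k < row.length →
      ((List.range m).foldl
        (fun a j =>
          (a.set j (if a.getD (row.length - 1 - j) 0 ≠ 0 then 0 else 1)).set
            (row.length - 1 - j) (if a.getD j 0 ≠ 0 then 0 else 1))
        row).getD k 0
        = if k < m ∨ row.length - m ≤ k then pvInv (row.getD (row.length - 1 - k) 0)
          else row.getD k 0 := by
  induction m with
  | zero => simp; omega
  | succ m ih =>
    obtain ⟨hlen, hval⟩ := ih (by omega)
    have h2m : 2 * m < row.length := by omega
    rw [List.range_succ, List.foldl_append, List.foldl_cons, List.foldl_nil]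
    constructor
    · simp only [List.length_set]; exact hlen
    · intro k hk
      rw [getD_set _ _ _ _ (by simp only [List.length_set]; omega),
          getD_set _ _ _ _ (by omega)]
      rw [hval m (by omega), hval (row.length - 1 - m) (by omega), hval k hk]
      have e1 : row.length - 1 - (row.length - 1 - m) = m := by omega
      rw [e1]
      split_ifs <;>
        first
          | rfl
          | omega
          | (unfold pvInv; congr 2; omega)
          | ((first
                | rw [show row.length - 1 - k = m from by omega]
                | rw [show row.length - 1 - k = row.length - 1 - m from by omega]
                | skip)
             <;> (unfold pvInv; simp_all))

theorem row_eq (row : List Int) : pvSwapRow (pvInvertRow row) = pvFusedRow row := by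
  obtain ⟨hilen, hival⟩ := invert_loop row row.length (le_refl _)
  have hilen' : (pvInvertRow row).length = row.length := hilen
  have hival' : ∀ k, k < row.length → (pvInvertRow row).getD k 0 = pvInv (row.getD k 0) := by
    intro k hk
    have h := hival k hk
    rw [if_pos hk] at h
    exact h
  obtain ⟨hslen, hsval⟩ := swap_loop (pvInvertRow row) ((pvInvertRow row).length / 2) (le_refl _)
  obtain ⟨hflen, hfval⟩ := fused_loop row ((row.length + 1) / 2) (le_refl _)
  have hA : pvSwapRow (pvInvertRow row)
      = (List.range ((pvInvertRow row).length / 2)).foldl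
          (fun a j =>
            (a.set j (a.getD ((pvInvertRow row).length - 1 - j) 0)).set
              ((pvInvertRow row).length - 1 - j) (a.getD j 0)) (pvInvertRow row) := rfl
  have hB : pvFusedRow row
      = (List.range ((row.length + 1) / 2)).foldl
          (fun a j =>
            (a.set j (if a.getD (row.length - 1 - j) 0 ≠ 0 then 0 else 1)).set
              (row.length - 1 - j) (if a.getD j 0 ≠ 0 then 0 else 1)) row := rfl
  apply List.ext_getElem
  · rw [hA, hB, hslen, hflen, hilen']
  · intro k h1 h2
    rw [← List.getD_eq_getElem _ 0 h1, ← List.getD_eq_getElem _ 0 h2]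
    have hk : k < row.length := by
      have := h2; rw [hB, hflen] at this; exact this
    rw [hA, hB, hsval k (by omega), hfval k hk]
    rw [hilen']
    have hcond : k < (row.length + 1) / 2 ∨ row.length - (row.length + 1) / 2 ≤ k := by omega
    rw [if_pos hcond]
    by_cases hc : k < row.length / 2 ∨ row.length - row.length / 2 ≤ k
    · rw [if_pos hc, hival' (row.length - 1 - k) (by omega)]
    · rw [if_neg hc, hival' k hk]
      have : row.length - 1 - k = k := by omega
      rw [this]

-- ===== VERDICT (by name: the statement is the Claim_ definition above) =====
theorem solve_spec : Claim_equal_solve := by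
  intro matrix _
  unfold Spec_solve solve solve_alt
  rw [List.map_map]
  exact List.map_congr_left (fun row _ => row_eq row)
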